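-- pv_equiv track=rewrite | github.com/sam-072/data-structure | Dynamic programming/High Effort vs Low Effort.py | Effort
-- ===== SOURCE A (Python) =====
-- def Effort(n,hi,li,i,k):
--     if i==n:
--         return 0
--     ans = 0
--     if k==0:
--         ans += max(0+Effort(n, hi, li, i+1, 0), li[i]+Effort(n, hi, li, i+1, 1), hi[i]+Effort(n, hi, li, i+1, 2))
--     elif k==1 or k==2:
--         ans += max(0+Effort(n, hi, li, i+1, 0), li[i]+Effort(n, hi, li, i+1, 1))
--     return ans
-- ===== SOURCE B (Python) =====
-- def Effort(n, hi, li, i, k):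
--     if k == 0 or k == 1 or k == 2:
--         rest = work = 0
--         for j in range(n - 1, i - 1, -1):
--             lw = li[j] + work
--             rest, work = max(rest, lw, hi[j] + work), max(rest, lw)
--         return rest if k == 0 else work
--     return 0
-- ===== Notes on version B (the rewrite author's own statement) =====
-- stated objective: alternative
-- what changed: Replaced the branching recursion over (i,k) with a bottom-up iterative DP that sweeps once from n-1 down to i maintaining the two state values (rested/worked), exploiting that states k=1 and k=2 behave identically.
import Mathlib
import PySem

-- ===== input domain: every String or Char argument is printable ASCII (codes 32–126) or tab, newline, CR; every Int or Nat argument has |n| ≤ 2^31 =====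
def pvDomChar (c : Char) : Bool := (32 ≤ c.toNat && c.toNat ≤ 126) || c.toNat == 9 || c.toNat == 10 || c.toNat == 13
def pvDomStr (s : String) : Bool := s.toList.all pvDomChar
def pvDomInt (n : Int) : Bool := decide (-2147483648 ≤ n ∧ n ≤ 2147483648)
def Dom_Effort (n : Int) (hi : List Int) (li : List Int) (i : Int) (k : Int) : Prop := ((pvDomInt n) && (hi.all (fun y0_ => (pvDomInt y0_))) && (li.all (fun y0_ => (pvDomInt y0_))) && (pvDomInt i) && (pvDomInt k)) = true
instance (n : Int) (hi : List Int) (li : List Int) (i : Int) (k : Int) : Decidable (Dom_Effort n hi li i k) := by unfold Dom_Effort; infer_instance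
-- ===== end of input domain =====

-- B replaces A's branching recursion over (i,k) by a single bottom-up sweep from
-- n-1 down to i maintaining the two distinct state values (k=1 and k=2 behave
-- identically in A) (objective: alternative).

-- ===== PORT A =====
-- fuel = (n - i).toNat; under Pre_Effort the recursion always reaches i = n before
-- the fuel runs out, so the fuel-0 fallback is never taken on admitted inputs.
def EffortA (fuel : Nat) (n : Int) (hi : List Int) (li : List Int) (i : Int) (k : Int) : Int :=
  if i = n then 0
  else
    match fuel with
    | 0 => 0
    | Nat.succ f =>
      if k = 0 then
        0 + max (max (0 + EffortA f n hi li (i+1) 0)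
                     ((PySem.List.pyGet? li i).getD 0 + EffortA f n hi li (i+1) 1))
                ((PySem.List.pyGet? hi i).getD 0 + EffortA f n hi li (i+1) 2)
      else if k = 1 ∨ k = 2 then
        0 + max (0 + EffortA f n hi li (i+1) 0)
                ((PySem.List.pyGet? li i).getD 0 + EffortA f n hi li (i+1) 1)
      else 0

def Effort (n : Int) (hi : List Int) (li : List Int) (i : Int) (k : Int) : Int :=
  EffortA (n - i).toNat n hi li i k

-- ===== PORT B =====
def EffortStep (hi : List Int) (li : List Int) (st : Int × Int) (j : Int) : Int × Int :=
  let lw := (PySem.List.pyGet? li j).getD 0 + st.2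
  (max (max st.1 lw) ((PySem.List.pyGet? hi j).getD 0 + st.2), max st.1 lw)

def Effort_alt (n : Int) (hi : List Int) (li : List Int) (i : Int) (k : Int) : Int :=
  if k = 0 ∨ k = 1 ∨ k = 2 then
    let s := (PySem.List.pyRange (n-1) (i-1) (-1)).foldl (EffortStep hi li) (0, 0)
    if k = 0 then s.1 else s.2
  else 0

-- ===== PRECONDITION & SPEC =====
-- Pre_ excludes exactly the inputs where Python A raises: with k ∈ {0,1,2} and i ≠ n
-- the recursion needs i ≤ n (else it never terminates: RecursionError) and every
-- index j ∈ [i, n) valid under Python's negative-index rule (else IndexError).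
def Pre_Effort (n : Int) (hi : List Int) (li : List Int) (i : Int) (k : Int) : Prop :=
  (k = 0 ∨ k = 1 ∨ k = 2) → i ≠ n →
    (i ≤ n ∧ n ≤ li.length ∧ n ≤ hi.length ∧ -(li.length : Int) ≤ i ∧ -(hi.length : Int) ≤ i)
instance (n : Int) (hi : List Int) (li : List Int) (i : Int) (k : Int) : Decidable (Pre_Effort n hi li i k) := by unfold Pre_Effort; infer_instance

def pvWitness_Effort : Int × List Int × List Int × Int × Int := (2, [5, 1], [3, 2], 0, 0)

def Spec_Effort (n : Int) (hi : List Int) (li : List Int) (i : Int) (k : Int) (out : Int) : Prop := out = Effort_alt n hi li i k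
instance (n : Int) (hi : List Int) (li : List Int) (i : Int) (k : Int) (out : Int) : Decidable (Spec_Effort n hi li i k out) := by unfold Spec_Effort; infer_instance

-- ===== CLAIM (what is proved, stated in full; the proofs are below) =====
def Claim_equal_Effort : Prop := ∀ (n : Int) (hi : List Int) (li : List Int) (i : Int) (k : Int), Dom_Effort n hi li i k → Pre_Effort n hi li i k → Spec_Effort n hi li i k (Effort n hi li i k)

-- ===== LEMMAS AND PROOFS =====

def EffortLoop (n : Int) (hi : List Int) (li : List Int) (i : Int) : Int × Int :=
  (PySem.List.pyRange (n-1) (i-1) (-1)).foldl (EffortStep hi li) (0, 0)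

lemma range_split (n i : Int) (h : i < n) :
    PySem.List.pyRange (n-1) (i-1) (-1) = PySem.List.pyRange (n-1) i (-1) ++ [i] := by
  have h1 : (i - 1) + 1 = i := by ring
  have h2 : (n - 1) + 1 = n := by ring
  rw [PySem.List.pyRange_neg_one_eq_reverse, PySem.List.pyRange_neg_one_eq_reverse, h1, h2,
      PySem.List.pyRange_one_cons h, List.reverse_cons]

lemma loop_pred (n : Int) (hi li : List Int) (i : Int) (h : i < n) :
    EffortLoop n hi li i = EffortStep hi li (EffortLoop n hi li (i+1)) i := by
  unfold EffortLoop
  have h1 : (i + 1) - 1 = i := by ring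
  rw [h1, range_split n i h, List.foldl_append, List.foldl_cons, List.foldl_nil]

lemma effortA_main (n : Int) (hi li : List Int) (d : Nat) (i : Int) (hd : i = n - d) :
    EffortA d n hi li i 0 = (EffortLoop n hi li i).1 ∧
    EffortA d n hi li i 1 = (EffortLoop n hi li i).2 ∧
    EffortA d n hi li i 2 = (EffortLoop n hi li i).2 := by
  induction d generalizing i with
  | zero =>
    have hin : i = n := by omega
    simp [EffortA, hin, EffortLoop]
  | succ f ih =>
    have hlt : i < n := by omega
    have hne : ¬ (i = n) := by omega
    have IH := ih (i+1) (by push_cast at hd ⊢; omega)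
    rw [loop_pred n hi li i hlt]
    refine ⟨?_, ?_, ?_⟩ <;>
      simp [EffortA, hne, EffortStep, IH.1, IH.2.1, IH.2.2] <;> omega

lemma effortA_badk (d : Nat) (n : Int) (hi li : List Int) (i k : Int)
    (h0 : ¬ k = 0) (h12 : ¬ (k = 1 ∨ k = 2)) :
    EffortA d n hi li i k = 0 := by
  cases d <;> simp [EffortA, h0, h12]

-- ===== VERDICT (by name: the statement is the Claim_ definition above) =====
theorem Effort_spec : Claim_equal_Effort := by
  intro n hi li i k _ _
  unfold Spec_Effort Effort Effort_alt
  by_cases hk : k = 0 ∨ k = 1 ∨ k = 2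
  · simp only [hk, if_true]
    by_cases hin : i ≤ n
    · have hd : i = n - ((n - i).toNat : Int) := by omega
      have H := effortA_main n hi li (n - i).toNat i hd
      rcases hk with hk | hk | hk <;> subst hk <;>
        simp [H.1, H.2.1, H.2.2, EffortLoop]
    · have hfuel : (n - i).toNat = 0 := by omega
      have hnil : PySem.List.pyRange (n-1) (i-1) (-1) = [] :=
        PySem.List.pyRange_neg_one_eq_nil (by omega)
      have hne : ¬ (i = n) := by omega
      simp [hfuel, EffortA, hne, hnil]
  · have h0 : ¬ k = 0 := fun h => hk (Or.inl h)
    have h12 : ¬ (k = 1 ∨ k = 2) := fun h => hk (Or.inr h)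
    simp only [if_neg hk]
    exact effortA_badk _ n hi li i k h0 h12
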